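-- pv_equiv track=rewrite | github.com/johan-van-eycken/eve-online-industry-tracker | src/eve_online_industry_tracker/application/industry/job_manager.py | _join_group_names
-- ===== SOURCE A (Python) =====
-- from typing import Any
--
-- def _join_group_names(entries: list[dict[str, Any]]) -> str:
--     names = sorted(
--         {
--             str(entry.get("group_name") or "").strip()
--             for entry in entries
--             if str(entry.get("group_name") or "").strip()
--         }
--     )
--     return ", ".join(names)
-- ===== SOURCE B (Python) =====
-- def _join_group_names(entries):
--     # Single pass: maintain `result` as a sorted duplicate-free list and insert each
--     # cleaned name at its lower-bound position (skipping it if already present).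
--     # No library sort and no set: ordering and uniqueness are built incrementally.
--     result = []
--     for entry in entries:
--         name = str(entry.get("group_name") or "").strip()
--         if not name:
--             continue
--         i = 0
--         while i < len(result) and result[i] < name:
--             i += 1
--         if i == len(result) or result[i] != name:
--             result.insert(i, name)
--     return ", ".join(result)
-- ===== Notes on version B (the rewrite author's own statement) =====
-- stated objective: alternative
-- what changed: B drops A's set comprehension and library sort entirely: it makes one pass over the entries, keeping a sorted duplicate-free list into which each cleaned name is inserted at its lower-bound position (or skipped if already there).
import Mathlib
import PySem

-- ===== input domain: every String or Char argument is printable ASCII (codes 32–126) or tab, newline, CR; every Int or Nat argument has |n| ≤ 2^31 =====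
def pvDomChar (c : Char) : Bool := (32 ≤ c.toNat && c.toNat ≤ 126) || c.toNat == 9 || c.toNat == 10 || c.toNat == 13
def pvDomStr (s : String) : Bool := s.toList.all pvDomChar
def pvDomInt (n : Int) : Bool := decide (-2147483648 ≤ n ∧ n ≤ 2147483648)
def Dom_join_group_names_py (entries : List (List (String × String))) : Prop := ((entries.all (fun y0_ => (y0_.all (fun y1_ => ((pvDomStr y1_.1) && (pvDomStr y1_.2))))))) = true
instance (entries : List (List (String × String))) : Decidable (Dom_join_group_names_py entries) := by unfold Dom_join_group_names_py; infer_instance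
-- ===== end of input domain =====

-- B replaces A's set-comprehension + library sort by a single pass that keeps a sorted
-- duplicate-free list, inserting each cleaned name at its lower-bound position; an
-- alternative algorithm of similar size, not claimed faster.

-- ===== PORT A =====
-- str(entry.get("group_name") or "").strip(): values are strings, so `v or ""` = getD ""
def pvCleanA (entry : List (String × String)) : String :=
  PySem.Str.strip ((entry.lookup "group_name").getD "")

def join_group_names_py (entries : List (List (String × String))) : String :=
  -- set comprehension {f(e) for e in entries if f(e)} = set of the filtered mapped list
  let names := PySem.List.sorted
    (PySem.Set.ofList ((entries.map pvCleanA).filter (fun n => n ≠ "")))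
    (fun x => x) false
  PySem.Str.join ", " names

-- ===== PORT B =====
-- `i = 0; while i < len(result) and result[i] < name: i += 1`: the loop walks off the
-- leading prefix of elements < name, so i = length of that prefix (structural recursion)
def pvFindPos : List String → String → Nat
  | [], _ => 0
  | h :: t, name => if h < name then pvFindPos t name + 1 else 0

-- `if i == len(result) or result[i] != name: result.insert(i, name)`
def pvInsertName (result : List String) (name : String) : List String :=
  let i := pvFindPos result name
  if i = result.length ∨ result[i]? ≠ some name then result.insertIdx i name else result

def join_group_names_py_alt (entries : List (List (String × String))) : String :=
  let result := entries.foldl (fun acc entry =>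
    let name := PySem.Str.strip ((entry.lookup "group_name").getD "")
    if name ≠ "" then pvInsertName acc name else acc) []
  PySem.Str.join ", " result

-- ===== PRECONDITION & SPEC =====
def Spec_join_group_names_py (entries : List (List (String × String))) (out : String) : Prop := out = join_group_names_py_alt entries
instance (entries : List (List (String × String))) (out : String) : Decidable (Spec_join_group_names_py entries out) := by unfold Spec_join_group_names_py; infer_instance

-- ===== CLAIM (what is proved, stated in full; the proofs are below) =====
def Claim_equal_join_group_names_py : Prop := ∀ (entries : List (List (String × String))), Dom_join_group_names_py entries → Spec_join_group_names_py entries (join_group_names_py entries)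

-- ===== LEMMAS AND PROOFS =====

theorem pvInsertName_nil (x : String) : pvInsertName [] x = [x] := by
  simp [pvInsertName, pvFindPos]

theorem pvFindPos_cons (h name : String) (t : List String) :
    pvFindPos (h :: t) name = if h < name then pvFindPos t name + 1 else 0 := rfl

theorem pvInsertName_cons_lt {h x : String} (t : List String) (hlt : h < x) :
    pvInsertName (h :: t) x = h :: pvInsertName t x := by
  simp only [pvInsertName, pvFindPos_cons, hlt, if_true]
  by_cases hc : pvFindPos t x = t.length ∨ t[pvFindPos t x]? ≠ some x
  · rw [if_pos, if_pos hc, List.insertIdx_succ_cons]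
    rcases hc with hc | hc
    · exact Or.inl (by simp [hc])
    · exact Or.inr (by simpa using hc)
  · rw [if_neg, if_neg hc]
    push Not at hc ⊢
    exact ⟨by simpa using hc.1, by simpa using hc.2⟩

theorem pvInsertName_cons_not_lt {h x : String} (t : List String) (hlt : ¬ h < x) :
    pvInsertName (h :: t) x = if h = x then h :: t else x :: h :: t := by
  simp only [pvInsertName, pvFindPos_cons, hlt, if_false]
  by_cases he : h = x
  · simp [he]
  · rw [if_pos (Or.inr (by simpa using he))]
    simp [he, List.insertIdx]

-- insertion keeps the list strictly increasing and adds exactly x to its members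
theorem pvInsertName_spec (x : String) : ∀ (acc : List String), acc.Pairwise (· < ·) →
    (pvInsertName acc x).Pairwise (· < ·) ∧
    (∀ y, y ∈ pvInsertName acc x ↔ y ∈ acc ∨ y = x) := by
  intro acc
  induction acc with
  | nil => intro _; rw [pvInsertName_nil]; simp
  | cons h t ih =>
    intro hpw
    rw [List.pairwise_cons] at hpw
    by_cases hlt : h < x
    · rw [pvInsertName_cons_lt t hlt]
      obtain ⟨hp, hm⟩ := ih hpw.2
      constructor
      · rw [List.pairwise_cons]
        refine ⟨fun y hy => ?_, hp⟩
        rcases (hm y).mp hy with h' | h'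
        · exact hpw.1 y h'
        · exact h' ▸ hlt
      · intro y
        rw [List.mem_cons, hm y, List.mem_cons]
        tauto
    · rw [pvInsertName_cons_not_lt t hlt]
      by_cases he : h = x
      · subst he
        rw [if_pos rfl]
        refine ⟨List.pairwise_cons.mpr hpw, fun y => ?_⟩
        simp only [List.mem_cons]
        tauto
      · have hxh : x < h := by
          rcases lt_trichotomy h x with h' | h' | h'
          · exact absurd h' hlt
          · exact absurd h' he
          · exact h'
        simp only [he, if_false]
        constructor
        · rw [List.pairwise_cons]
          refine ⟨fun y hy => ?_, List.pairwise_cons.mpr hpw⟩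
          rcases List.mem_cons.mp hy with rfl | hy
          · exact hxh
          · exact lt_trans hxh (hpw.1 y hy)
        · intro y; simp only [List.mem_cons]; tauto

-- folding insertions over L from a strictly increasing acc: still strictly increasing,
-- members = acc's plus L's
theorem pv_fold_inv : ∀ (L : List String) (acc : List String), acc.Pairwise (· < ·) →
    (L.foldl pvInsertName acc).Pairwise (· < ·) ∧
    (∀ y, y ∈ L.foldl pvInsertName acc ↔ y ∈ acc ∨ y ∈ L) := by
  intro L
  induction L with
  | nil => intro acc h; exact ⟨h, by simp⟩
  | cons a L ih =>
    intro acc hpw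
    obtain ⟨hp1, hm1⟩ := pvInsertName_spec a acc hpw
    obtain ⟨hp2, hm2⟩ := ih (pvInsertName acc a) hp1
    refine ⟨hp2, fun y => ?_⟩
    rw [List.foldl_cons] at *
    rw [hm2 y, hm1 y, List.mem_cons]
    tauto

theorem pv_fold_eq_sorted_set (L : List String) :
    L.foldl pvInsertName [] = PySem.List.sorted (PySem.Set.ofList L) (fun x => x) false := by
  obtain ⟨hp, hm⟩ := pv_fold_inv L [] List.Pairwise.nil
  symm
  apply PySem.List.sorted_eq_of_perm_of_pairwise_lt
  · rw [List.perm_ext_iff_of_nodup (hp.imp ne_of_lt) (PySem.Set.nodup_ofList _)]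
    intro x
    rw [hm x, PySem.Set.mem_ofList]
    simp
  · simpa using hp

-- B's guarded fold over entries = fold of pvInsertName over the cleaned filtered names
theorem pv_guard_fold (entries : List (List (String × String))) : ∀ (acc : List String),
    entries.foldl (fun acc entry =>
      let name := PySem.Str.strip ((entry.lookup "group_name").getD "")
      if name ≠ "" then pvInsertName acc name else acc) acc
    = ((entries.map pvCleanA).filter (fun n => n ≠ "")).foldl pvInsertName acc := by
  induction entries with
  | nil => intro acc; rfl
  | cons e es ih =>
    intro acc
    rw [List.foldl_cons, ih, List.map_cons, List.filter_cons]
    by_cases hne : PySem.Str.strip ((e.lookup "group_name").getD "") = ""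
    · simp [pvCleanA, hne]
    · simp [pvCleanA, hne]

theorem join_group_names_py_eq_alt (entries : List (List (String × String))) :
    join_group_names_py entries = join_group_names_py_alt entries := by
  unfold join_group_names_py join_group_names_py_alt
  rw [pv_guard_fold entries [], pv_fold_eq_sorted_set]

-- ===== VERDICT (by name: the statement is the Claim_ definition above) =====
theorem join_group_names_py_spec : Claim_equal_join_group_names_py := by
  intro entries _
  exact (join_group_names_py_eq_alt entries).symm ▸ rfl
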